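-- pv_equiv track=rewrite | github.com/Ranjithkumar3005/python_programs | leetcode/miss_inte.py | missingInteger
-- ===== SOURCE A (Python) =====
-- def missingInteger(nums):
--     """
--     :type nums: List[int]
--     :rtype: int
--     """
--     sum = nums[0]
--     for i in range(1, len(nums)):
--         if nums[i] == nums[i - 1] + 1:
--             sum = sum + nums[i]
--         else:
--             break
--
--     while sum in nums:
--         sum += 1
--     return sum
-- ===== SOURCE B (Python) =====
-- def missingInteger(nums):
--     s = nums[0]
--     for i in range(1, len(nums)):
--         if nums[i] == nums[i - 1] + 1:
--             s = s + nums[i]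
--         else:
--             break
--     cand = s
--     for v in sorted(nums):
--         if v < cand:
--             continue
--         elif v == cand:
--             cand += 1
--         else:
--             break
--     return cand
-- ===== Notes on version B (the rewrite author's own statement) =====
-- stated objective: alternative
-- what changed: Phase two replaces the repeated 'while sum in nums' membership scans with one sort of nums followed by a single linear sweep that advances the candidate past matching values.
import Mathlib
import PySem

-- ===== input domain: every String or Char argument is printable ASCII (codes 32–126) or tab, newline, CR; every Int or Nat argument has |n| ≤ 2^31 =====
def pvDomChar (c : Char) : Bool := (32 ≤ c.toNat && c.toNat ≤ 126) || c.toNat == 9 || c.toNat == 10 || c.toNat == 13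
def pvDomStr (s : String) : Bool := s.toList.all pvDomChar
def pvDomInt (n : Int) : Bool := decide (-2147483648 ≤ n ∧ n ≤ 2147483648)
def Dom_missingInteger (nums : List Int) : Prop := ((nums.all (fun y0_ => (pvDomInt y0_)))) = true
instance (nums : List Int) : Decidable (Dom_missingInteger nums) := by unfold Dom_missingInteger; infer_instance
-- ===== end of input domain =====

-- B sorts nums once and finds the smallest missing value ≥ the prefix sum in a single sorted sweep,
-- instead of A's repeated `sum in nums` membership scans (alternative algorithm, similar cost).


-- ===== PORT A =====
-- shared phase 1 (identical in Source A and Source B): accumulate while nums[i] == nums[i-1] + 1, else break.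
-- Indices i and i-1 are always in range here (1 ≤ i < length), so getD's default is never used.
def prefixLoop (nums : List Int) (i : Nat) (s : Int) : Int :=
  if _h : i < nums.length then
    if nums.getD i 0 == nums.getD (i - 1) 0 + 1 then
      prefixLoop nums (i + 1) (s + nums.getD i 0)
    else s
  else s
termination_by nums.length - i

-- `while sum in nums: sum += 1`; fuel length+1 suffices (a run of k increments puts k distinct
-- values of nums below the final sum, so k ≤ length) — fuel is only a totality guard.
def whileIn (nums : List Int) : Nat → Int → Int
  | 0, s => s
  | f + 1, s => if s ∈ nums then whileIn nums f (s + 1) else s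

def missingInteger (nums : List Int) : Int :=
  whileIn nums (nums.length + 1) (prefixLoop nums 1 (nums.getD 0 0))

-- ===== PORT B =====
-- single sweep over the sorted list: skip values < cand, bump cand on equality, break on >.
def sweep : List Int → Int → Int
  | [], c => c
  | v :: vs, c => if v < c then sweep vs c else if v == c then sweep vs (c + 1) else c

def missingInteger_alt (nums : List Int) : Int :=
  sweep (PySem.List.sorted nums (fun x => x) false) (prefixLoop nums 1 (nums.getD 0 0))

-- ===== PRECONDITION & SPEC =====
-- both A and B index the first element, which raises IndexError on the empty list.
def Pre_missingInteger (nums : List Int) : Prop := nums ≠ []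
instance (nums : List Int) : Decidable (Pre_missingInteger nums) := by unfold Pre_missingInteger; infer_instance
def pvWitness_missingInteger : List Int := [1, 2, 3, 7]

def Spec_missingInteger (nums : List Int) (out : Int) : Prop := out = missingInteger_alt nums
instance (nums : List Int) (out : Int) : Decidable (Spec_missingInteger nums out) := by unfold Spec_missingInteger; infer_instance

-- ===== CLAIM (what is proved, stated in full; the proofs are below) =====
def Claim_equal_missingInteger : Prop := ∀ (nums : List Int), Dom_missingInteger nums → Pre_missingInteger nums → Spec_missingInteger nums (missingInteger nums)

-- ===== LEMMAS AND PROOFS =====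

-- the common specification of phase 2: m is the least value ≥ c missing from S
def IsLeastFree (S : List Int) (c m : Int) : Prop :=
  c ≤ m ∧ m ∉ S ∧ ∀ x, c ≤ x → x < m → x ∈ S

theorem leastFree_unique {S : List Int} {c m m' : Int}
    (h : IsLeastFree S c m) (h' : IsLeastFree S c m') : m = m' := by
  obtain ⟨hc, hm, hmin⟩ := h
  obtain ⟨hc', hm', hmin'⟩ := h'
  rcases lt_trichotomy m m' with hlt | he | hlt
  · exact absurd (hmin' m hc hlt) hm
  · exact he
  · exact absurd (hmin m' hc' hlt) hm'

theorem leastFree_congr {S S' : List Int} {c m : Int}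
    (hmem : ∀ x, x ∈ S ↔ x ∈ S') (h : IsLeastFree S c m) : IsLeastFree S' c m := by
  obtain ⟨hc, hm, hmin⟩ := h
  exact ⟨hc, fun hx => hm ((hmem m).mpr hx), fun x h1 h2 => (hmem x).mp (hmin x h1 h2)⟩

-- any length+1 consecutive values cannot all lie in nums
theorem exists_free (S : List Int) (c : Int) :
    ∃ k : Nat, k ≤ S.length ∧ (c + k) ∉ S := by
  by_contra h
  push Not at h
  have hsub : ((List.range (S.length + 1)).map (fun k : Nat => c + k)) ⊆ S := by
    intro x hx
    simp only [List.mem_map, List.mem_range] at hx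
    obtain ⟨k, hk, rfl⟩ := hx
    exact h k (by omega)
  have hnd : ((List.range (S.length + 1)).map (fun k : Nat => c + k)).Nodup := by
    refine List.Nodup.map ?_ (List.nodup_range)
    intro a b hab
    simpa using hab
  have := (hnd.subperm hsub).length_le
  simp at this

theorem whileIn_spec (S : List Int) (f : Nat) (c : Int)
    (h : ∃ k : Nat, k < f ∧ (c + k) ∉ S) : IsLeastFree S c (whileIn S f c) := by
  induction f generalizing c with
  | zero => obtain ⟨k, hk, _⟩ := h; omega
  | succ f ih =>
    obtain ⟨k, hk, hkf⟩ := h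
    by_cases hc : c ∈ S
    · have hk0 : k ≠ 0 := by rintro rfl; simp at hkf; exact hkf hc
      have hrec : ∃ k' : Nat, k' < f ∧ (c + 1 + k') ∉ S := by
        refine ⟨k - 1, by omega, ?_⟩
        have : c + 1 + ((k : Int) - 1) = c + k := by ring
        have hcast : ((k - 1 : Nat) : Int) = (k : Int) - 1 := by omega
        rw [hcast, this]; exact hkf
      obtain ⟨h1, h2, h3⟩ := ih (c + 1) hrec
      rw [whileIn, if_pos hc]
      refine ⟨by omega, h2, ?_⟩
      intro x hx1 hx2
      by_cases hxc : x = c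
      · exact hxc ▸ hc
      · exact h3 x (by omega) hx2
    · rw [whileIn, if_neg hc]
      exact ⟨le_refl c, hc, fun x h1 h2 => absurd (lt_of_le_of_lt h1 h2) (lt_irrefl c)⟩

theorem sweep_spec (l : List Int) (c : Int) (hs : l.Pairwise (· ≤ ·)) :
    IsLeastFree l c (sweep l c) := by
  induction l generalizing c with
  | nil =>
    exact ⟨le_refl c, by simp, fun x h1 h2 => absurd (lt_of_le_of_lt h1 h2) (lt_irrefl c)⟩
  | cons v vs ih =>
    rw [List.pairwise_cons] at hs
    obtain ⟨hv, hp⟩ := hs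
    by_cases hlt : v < c
    · obtain ⟨h1, h2, h3⟩ := ih c hp
      rw [sweep, if_pos hlt]
      refine ⟨h1, ?_, fun x hx1 hx2 => List.mem_cons_of_mem v (h3 x hx1 hx2)⟩
      simp only [List.mem_cons, not_or]
      exact ⟨by omega, h2⟩
    · by_cases heq : v = c
      · obtain ⟨h1, h2, h3⟩ := ih (c + 1) hp
        rw [sweep, if_neg hlt, if_pos (by simpa using heq)]
        refine ⟨by omega, ?_, ?_⟩
        · simp only [List.mem_cons, not_or]
          exact ⟨by omega, h2⟩
        · intro x hx1 hx2
          by_cases hxc : x = c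
          · rw [hxc, ← heq]; exact List.mem_cons_self
          · exact List.mem_cons_of_mem v (h3 x (by omega) hx2)
      · rw [sweep, if_neg hlt, if_neg (by simpa using heq)]
        refine ⟨le_refl c, ?_, fun x h1 h2 => absurd (lt_of_le_of_lt h1 h2) (lt_irrefl c)⟩
        simp only [List.mem_cons, not_or]
        refine ⟨fun h => heq h.symm, fun hcv => ?_⟩
        exact absurd (hv c hcv) (by omega)

-- ===== VERDICT (by name: the statement is the Claim_ definition above) =====
theorem missingInteger_spec : Claim_equal_missingInteger := by
  intro nums _ _
  unfold Spec_missingInteger missingInteger missingInteger_alt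
  set c := prefixLoop nums 1 (nums.getD 0 0)
  have hmem : ∀ x : Int, x ∈ PySem.List.sorted nums (fun x => x) false ↔ x ∈ nums :=
    fun x => PySem.List.mem_sorted nums (fun x => x) false x
  have h1 : IsLeastFree nums c (whileIn nums (nums.length + 1) c) := by
    obtain ⟨k, hk, hf⟩ := exists_free nums c
    exact whileIn_spec nums (nums.length + 1) c ⟨k, by omega, hf⟩
  have h2 : IsLeastFree nums c (sweep (PySem.List.sorted nums (fun x => x) false) c) := by
    refine leastFree_congr hmem (sweep_spec _ c ?_)
    simpa using PySem.List.sorted_pairwise (xs := nums) (key := fun x => x)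
  exact leastFree_unique h1 h2
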